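-- pv_equiv track=rewrite | github.com/saltstack/salt | salt/utils/http.py | _sanitize_url_components
-- ===== SOURCE A (Python) =====
-- def _sanitize_url_components(comp_list, field):
--     """
--     Recursive function to sanitize each component of the url.
--     """
--     if not comp_list:
--         return ""
--     elif comp_list[0].startswith(f"{field}="):
--         ret = f"{field}=XXXXXXXXXX&"
--         comp_list.remove(comp_list[0])
--         return ret + _sanitize_url_components(comp_list, field)
--     else:
--         ret = f"{comp_list[0]}&"
--         comp_list.remove(comp_list[0])
--         return ret + _sanitize_url_components(comp_list, field)
-- ===== SOURCE B (Python) =====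
-- def _sanitize_url_components(comp_list, field):
--     """Iterative drain: pop components off the front while growing one result string."""
--     result = ""
--     prefix = field + "="
--     mask = field + "=XXXXXXXXXX&"
--     while comp_list:
--         c = comp_list.pop(0)
--         if c.startswith(prefix):
--             result += mask
--         else:
--             result += c + "&"
--     return result
-- ===== Notes on version B (the rewrite author's own statement) =====
-- stated objective: simpler
-- what changed: Replaces A's self-recursion with per-call f-string building and list.remove by a flat while-pop loop that precomputes the prefix and mask once and grows a single accumulator string.
import Mathlib
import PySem

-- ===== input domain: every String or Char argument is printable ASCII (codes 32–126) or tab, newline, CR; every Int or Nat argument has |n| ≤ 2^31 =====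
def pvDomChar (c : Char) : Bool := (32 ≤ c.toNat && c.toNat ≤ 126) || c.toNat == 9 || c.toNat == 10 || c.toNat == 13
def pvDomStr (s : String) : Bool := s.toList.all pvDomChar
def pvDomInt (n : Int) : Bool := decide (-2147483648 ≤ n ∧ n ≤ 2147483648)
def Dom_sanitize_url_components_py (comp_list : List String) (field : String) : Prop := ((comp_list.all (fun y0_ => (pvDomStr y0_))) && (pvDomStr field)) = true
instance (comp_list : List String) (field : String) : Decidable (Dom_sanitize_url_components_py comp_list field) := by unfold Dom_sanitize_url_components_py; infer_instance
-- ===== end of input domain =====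

-- B replaces A's recursion-with-remove by a flat while-pop loop growing one accumulator string
-- (prefix and mask precomputed once); equivalence is about the RETURN value: both A and B
-- empty the comp_list argument in place.
-- ===== PORT A =====
-- A's `comp_list.remove(comp_list[0])` removes the first element equal to the head, i.e. the head
-- itself, so the recursion proceeds on the tail; only the returned string is claimed here.
def sanitize_url_components_py (comp_list : List String) (field : String) : String :=
  match comp_list with
  | [] => ""
  | c :: rest =>
    if PySem.Str.startswith c (PySem.Str.join "" [field, "="]) then
      PySem.Str.join "" [PySem.Str.join "" [field, "=XXXXXXXXXX&"], sanitize_url_components_py rest field]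
    else
      PySem.Str.join "" [PySem.Str.join "" [c, "&"], sanitize_url_components_py rest field]

-- ===== PORT B =====
-- B: the while-pop loop over comp_list is a left fold with the accumulator string `result`;
-- `prefix` and `mask` are the precomputed `field + "="` / `field + "=XXXXXXXXXX&"`.
def sanitize_url_components_py_alt (comp_list : List String) (field : String) : String :=
  let pfx := field ++ "="
  let msk := field ++ "=XXXXXXXXXX&"
  comp_list.foldl
    (fun result c =>
      if PySem.Str.startswith c pfx then result ++ msk else result ++ (c ++ "&"))
    ""

-- ===== PRECONDITION & SPEC =====
def Spec_sanitize_url_components_py (comp_list : List String) (field : String) (out : String) : Prop := out = sanitize_url_components_py_alt comp_list field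
instance (comp_list : List String) (field : String) (out : String) : Decidable (Spec_sanitize_url_components_py comp_list field out) := by unfold Spec_sanitize_url_components_py; infer_instance

-- ===== CLAIM =====
def Claim_equal_sanitize_url_components_py : Prop := ∀ (comp_list : List String) (field : String), Dom_sanitize_url_components_py comp_list field → Spec_sanitize_url_components_py comp_list field (sanitize_url_components_py comp_list field)

-- ===== LEMMAS AND PROOFS =====
-- A's f-string `f"{x}{y}"` (ported as join "" [x, y]) is string concatenation.
lemma join_pair_eq_append (a b : String) : PySem.Str.join "" [a, b] = a ++ b := by
  apply String.toList_inj.mp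
  simp [PySem.Str.toList_join, PySem.Chars.join_cons_cons, PySem.Chars.join_singleton]

-- The fold started from any accumulator prepends that accumulator to A's recursive result.
lemma foldl_acc_eq (field : String) (l : List String) (acc : String) :
    l.foldl
      (fun result c =>
        if PySem.Str.startswith c (field ++ "=") then result ++ (field ++ "=XXXXXXXXXX&")
        else result ++ (c ++ "&")) acc
    = acc ++ sanitize_url_components_py l field := by
  induction l generalizing acc with
  | nil => simp [sanitize_url_components_py]
  | cons c rest ih =>
    simp only [List.foldl_cons, sanitize_url_components_py, join_pair_eq_append, ih]
    split <;> simp [String.append_assoc]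

theorem sanitize_url_components_py_spec : Claim_equal_sanitize_url_components_py := by
  intro comp_list field _
  unfold Spec_sanitize_url_components_py sanitize_url_components_py_alt
  simpa using (foldl_acc_eq field comp_list "").symm
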